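-- pv_equiv track=rewrite | github.com/AndrejLiptak/schoolwork | Python/mhw5.py | rook_in_danger
-- ===== SOURCE A (Python) =====
-- def rook_in_danger(plan):
--     rook_index= []
--     for row in plan:
--         if row.count('#') > 1:
--             return True
--         elif '#' in row:
--             if row.index('#') in rook_index:
--                 return True
--             else:
--                 rook_index.append(row.index('#'))
--     return False
-- ===== SOURCE B (Python) =====
-- def rook_in_danger(plan):
--     seen_rows = set()
--     seen_cols = set()
--     for r, row in enumerate(plan):
--         for c, ch in enumerate(row):
--             if ch == '#':
--                 if r in seen_rows or c in seen_cols: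
--                     return True
--                 seen_rows.add(r)
--                 seen_cols.add(c)
--     return False
-- ===== Notes on version B (the rewrite author's own statement) =====
-- stated objective: alternative
-- what changed: Replaces A's per-row count('#')/index('#') passes and a growing column-index list with a single nested scan over cells that tracks seen row indices and seen column indices in two sets, returning on the first coordinate collision.
import Mathlib
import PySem

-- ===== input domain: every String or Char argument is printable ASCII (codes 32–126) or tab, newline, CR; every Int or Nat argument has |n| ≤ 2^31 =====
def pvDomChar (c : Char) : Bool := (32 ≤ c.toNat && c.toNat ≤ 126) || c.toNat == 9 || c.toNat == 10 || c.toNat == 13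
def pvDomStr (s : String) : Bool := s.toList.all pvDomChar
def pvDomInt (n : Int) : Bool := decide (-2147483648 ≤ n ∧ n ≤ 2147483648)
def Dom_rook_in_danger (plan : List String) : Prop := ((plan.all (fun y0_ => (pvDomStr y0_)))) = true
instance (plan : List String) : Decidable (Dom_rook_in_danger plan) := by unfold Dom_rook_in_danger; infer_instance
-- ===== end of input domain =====

-- B replaces A's per-row count('#')/index('#') passes and its list of seen column indices with a
-- single nested cell scan tracking seen row and column indices in two sets (alternative algorithm, same cost).

-- ===== PORT A =====
def rookInDangerLoop : List String → List Int → Bool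
  | [], _ => false
  | row :: rest, rook_index =>
    if PySem.Str.count row "#" > 1 then true
    else if PySem.Str.isIn "#" row then
      -- row.index('#') is guarded by the '#' in row test above, so it equals Str.find here (no ValueError)
      if PySem.Str.find row "#" ∈ rook_index then true
      else rookInDangerLoop rest (rook_index ++ [PySem.Str.find row "#"])
    else rookInDangerLoop rest rook_index

def rook_in_danger (plan : List String) : Bool := rookInDangerLoop plan []

-- ===== PORT B =====
-- inner loop: 'for c, ch in enumerate(row)'; returns none on 'return True', otherwise the updated sets
def rookInDangerScanRow : List Char → Int → Int → PySem.Set Int → PySem.Set Int → Option (PySem.Set Int × PySem.Set Int)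
  | [], _, _, seen_rows, seen_cols => some (seen_rows, seen_cols)
  | ch :: rest, r, c, seen_rows, seen_cols =>
    if ch = '#' then
      if r ∈ seen_rows ∨ c ∈ seen_cols then none
      else rookInDangerScanRow rest r (c + 1) (PySem.Set.add seen_rows r) (PySem.Set.add seen_cols c)
    else rookInDangerScanRow rest r (c + 1) seen_rows seen_cols

-- outer loop: 'for r, row in enumerate(plan)'
def rookInDangerScan : List String → Int → PySem.Set Int → PySem.Set Int → Bool
  | [], _, _, _ => false
  | row :: rest, r, seen_rows, seen_cols =>
    match rookInDangerScanRow row.toList r 0 seen_rows seen_cols with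
    | none => true
    | some (sr', sc') => rookInDangerScan rest (r + 1) sr' sc'

def rook_in_danger_alt (plan : List String) : Bool :=
  rookInDangerScan plan 0 PySem.Set.empty PySem.Set.empty

-- ===== PRECONDITION & SPEC =====
def Spec_rook_in_danger (plan : List String) (out : Bool) : Prop := out = rook_in_danger_alt plan
instance (plan : List String) (out : Bool) : Decidable (Spec_rook_in_danger plan out) := by unfold Spec_rook_in_danger; infer_instance

-- ===== CLAIM (what is proved, stated in full; the proofs are below) =====
def Claim_equal_rook_in_danger : Prop := ∀ (plan : List String), Dom_rook_in_danger plan → Spec_rook_in_danger plan (rook_in_danger plan)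


-- ===== LEMMAS AND PROOFS =====

-- Python str.count of a single-character needle is the character count (the prelude has no count lemma)
lemma pvCountGoSingleton (a : Char) : ∀ (fuel : Nat) (cs : List Char) (acc : Nat), cs.length ≤ fuel →
    PySem.Chars.count.go [a] fuel cs acc = acc + cs.count a := by
  intro fuel
  induction fuel with
  | zero =>
    intro cs acc h
    cases cs with
    | nil => simp [PySem.Chars.count.go]
    | cons x t => simp at h
  | succ n ih =>
    intro cs acc h
    cases cs with
    | nil => simp [PySem.Chars.count.go]
    | cons x t =>
      by_cases hx : x = a
      · subst hx
        rw [show PySem.Chars.count.go [x] (n+1) (x :: t) acc = PySem.Chars.count.go [x] n t (acc + 1) by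
              simp [PySem.Chars.count.go, List.isPrefixOf]]
        rw [ih t (acc + 1) (by simpa using h)]
        simp; omega
      · rw [show PySem.Chars.count.go [a] (n+1) (x :: t) acc = PySem.Chars.count.go [a] n t acc by
              simp [PySem.Chars.count.go, List.isPrefixOf]
              intro hax; exact absurd hax.symm hx]
        rw [ih t acc (by simpa using h)]
        simp [hx]

lemma pvCountSingleton (a : Char) (cs : List Char) : PySem.Chars.count cs [a] = cs.count a := by
  simpa [PySem.Chars.count] using pvCountGoSingleton a cs.length cs 0 le_rfl

lemma pvIsInSingleton (a : Char) (cs : List Char) : PySem.Chars.isIn [a] cs = cs.contains a := by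
  by_cases h : a ∈ cs
  · rw [(PySem.Chars.isIn_iff_infix [a] cs).mpr ((List.singleton_infix_iff a cs).mpr h)]
    simpa using h
  · rw [(PySem.Chars.isIn_eq_false_iff [a] cs).mpr (by simpa [List.singleton_infix_iff] using h)]
    simpa using h

lemma pvSingletonPrefix (a : Char) (l : List Char) : [a] <+: l ↔ l.head? = some a := by
  cases l with
  | nil => simp
  | cons x t =>
    constructor
    · rintro ⟨s, hs⟩; simp at hs; simp [hs.1]
    · intro h; simp at h; exact ⟨t, by simp [h]⟩

lemma pvFindSingleton (a : Char) (cs : List Char) (i : Nat)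
    (h : PySem.List.index? cs a = some i) : PySem.Chars.find cs [a] = (i : Int) := by
  obtain ⟨hk, hget, hmin⟩ := PySem.List.getElem_of_index?_eq_some h
  have hmem : a ∈ cs := hget ▸ List.getElem_mem hk
  have hnn : 0 ≤ PySem.Chars.find cs [a] :=
    (PySem.Chars.find_nonneg_iff cs [a]).mpr ((List.singleton_infix_iff a cs).mpr hmem)
  obtain ⟨hpre, hfmin⟩ := PySem.Chars.find_spec hnn
  have hfi : cs[(PySem.Chars.find cs [a]).toNat]? = some a := by
    rw [← List.head?_drop]; exact (pvSingletonPrefix a _).mp hpre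
  have h1 : ¬ i < (PySem.Chars.find cs [a]).toNat := by
    intro hlt
    exact hfmin i hlt ((pvSingletonPrefix a _).mpr
      (by rw [List.head?_drop, List.getElem?_eq_getElem hk, hget]))
  have h2 : ¬ (PySem.Chars.find cs [a]).toNat < i := by
    intro hlt
    have hlen : (PySem.Chars.find cs [a]).toNat < cs.length := Nat.lt_trans hlt hk
    exact hmin _ hlt (by simpa [List.getElem?_eq_getElem hlen] using hfi)
  omega

-- inner scan once this row's index is already in seen_rows: danger iff another '#' remains
lemma pvScanRowSkip (r : Int) (seen_rows seen_cols : PySem.Set Int) (h : r ∈ seen_rows) :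
    ∀ (cs : List Char) (c : Int),
      rookInDangerScanRow cs r c seen_rows seen_cols =
        if cs.contains '#' then none else some (seen_rows, seen_cols) := by
  intro cs
  induction cs with
  | nil => intro c; simp [rookInDangerScanRow]
  | cons x t ih =>
    intro c
    by_cases hx : x = '#'
    · subst hx; simp [rookInDangerScanRow, h]
    · have hx' : ¬ ('#' = x) := fun hh => hx hh.symm
      simp [rookInDangerScanRow, hx, hx', ih]

-- characterisation of the inner scan for a fresh row index
lemma pvScanRowSpec (r : Int) (seen_rows : PySem.Set Int) (hr : r ∉ seen_rows) :
    ∀ (cs : List Char) (c : Int) (seen_cols : PySem.Set Int),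
      rookInDangerScanRow cs r c seen_rows seen_cols =
        match PySem.List.index? cs '#' with
        | none => some (seen_rows, seen_cols)
        | some i =>
          if (c + (i : Int)) ∈ seen_cols then none
          else if (cs.drop (i + 1)).contains '#' then none
          else some (PySem.Set.add seen_rows r, PySem.Set.add seen_cols (c + (i : Int))) := by
  intro cs
  induction cs with
  | nil => intro c sc; simp [rookInDangerScanRow, PySem.List.index?]
  | cons x t ih =>
    intro c sc
    by_cases hx : x = '#'
    · subst hx
      rw [PySem.List.index?_cons_self]
      by_cases hc : c ∈ sc
      · simp [rookInDangerScanRow, hr, hc]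
      · have hmem : r ∈ PySem.Set.add seen_rows r := by
          rw [PySem.Set.mem_add]; right; rfl
        rw [show rookInDangerScanRow ('#' :: t) r c seen_rows sc =
              rookInDangerScanRow t r (c + 1) (PySem.Set.add seen_rows r) (PySem.Set.add sc c) from by
              simp [rookInDangerScanRow, hr, hc]]
        rw [pvScanRowSkip r _ _ hmem t (c + 1)]
        by_cases ht : '#' ∈ t <;> simp [ht, hc]
    · rw [PySem.List.index?_cons_of_ne t hx]
      rw [show rookInDangerScanRow (x :: t) r c seen_rows sc =
            rookInDangerScanRow t r (c + 1) seen_rows sc from by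
            simp [rookInDangerScanRow, hx]]
      rw [ih (c + 1) sc]
      cases hidx : PySem.List.index? t '#' with
      | none => simp
      | some i =>
        simp only [Option.map_some]
        have harith : c + 1 + (i : Int) = c + ((i + 1 : Nat) : Int) := by push_cast; ring
        have hdrop : t.drop (i + 1) = (x :: t).drop (i + 1 + 1) := by simp
        rw [harith, hdrop]

-- outer loops agree: the seen-column set equals A's rook_index list, every seen row index is below r
lemma pvScanEqLoop : ∀ (plan : List String) (r : Int) (seen_rows : PySem.Set Int) (acc : List Int),
    (∀ x ∈ seen_rows, x < r) →
    rookInDangerScan plan r seen_rows acc = rookInDangerLoop plan acc := by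
  intro plan
  induction plan with
  | nil => intro r sr acc _; rfl
  | cons row rest ih =>
    intro r sr acc hsr
    have hr : r ∉ sr := fun hmem => absurd (hsr r hmem) (lt_irrefl r)
    have hcount : PySem.Str.count row "#" = row.toList.count '#' := by
      rw [PySem.Str.count_eq]; exact pvCountSingleton '#' row.toList
    have hisin : PySem.Str.isIn "#" row = row.toList.contains '#' := by
      rw [PySem.Str.isIn_eq]; exact pvIsInSingleton '#' row.toList
    simp only [rookInDangerScan, rookInDangerLoop]
    rw [pvScanRowSpec r sr hr row.toList 0 acc]
    cases hidx : PySem.List.index? row.toList '#' with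
    | none =>
      have hnotmem : '#' ∉ row.toList := (PySem.List.index?_eq_none_iff _ _).mp hidx
      have hc0 : row.toList.count '#' = 0 := List.count_eq_zero.mpr hnotmem
      rw [if_neg (by rw [hcount, hc0]; omega), if_neg (by rw [hisin]; simpa using hnotmem)]
      exact ih (r + 1) sr acc (fun x hx => lt_trans (hsr x hx) (by omega))
    | some i =>
      obtain ⟨pre, suf, hsplit, hlen, hpre⟩ := (PySem.List.index?_eq_some_iff _ _ _).mp hidx
      have hfind : PySem.Str.find row "#" = (i : Int) := by
        rw [PySem.Str.find_eq]; exact pvFindSingleton '#' row.toList i hidx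
      have hdrop : row.toList.drop (i + 1) = suf := by
        rw [hsplit, show pre ++ '#' :: suf = (pre ++ ['#']) ++ suf by simp,
            show i + 1 = (pre ++ ['#']).length by simp [hlen], List.drop_left]
      have hcnt : row.toList.count '#' = suf.count '#' + 1 := by
        rw [hsplit]; simp [List.count_append, List.count_eq_zero.mpr hpre]
      have h0 : (0 : Int) + (i : Int) = (i : Int) := by ring
      have hmemrow : PySem.Str.isIn "#" row = true := by
        rw [hisin, hsplit]; simp
      dsimp only
      rw [h0]
      by_cases hic : ((i : Int)) ∈ acc
      · rw [if_pos hic]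
        by_cases hsuf : '#' ∈ suf
        · rw [if_pos (by rw [hcount, hcnt]; have := List.count_pos_iff.mpr hsuf; omega)]
        · rw [if_neg (by rw [hcount, hcnt, List.count_eq_zero.mpr hsuf]; omega),
              if_pos hmemrow, hfind, if_pos hic]
      · rw [if_neg hic]
        by_cases hsuf : '#' ∈ suf
        · rw [if_pos (show (row.toList.drop (i+1)).contains '#' = true by rw [hdrop]; simpa using hsuf)]
          rw [if_pos (by rw [hcount, hcnt]; have := List.count_pos_iff.mpr hsuf; omega)]
        · rw [if_neg (show ¬ (row.toList.drop (i+1)).contains '#' = true by rw [hdrop]; simpa using hsuf)]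
          rw [if_neg (by rw [hcount, hcnt, List.count_eq_zero.mpr hsuf]; omega),
              if_pos hmemrow, hfind, if_neg hic]
          have hadd : PySem.Set.add acc ((i : Int)) = acc ++ [(i : Int)] := by
            simp [PySem.Set.add]
            intro hmem; exact absurd hmem hic
          rw [hadd]
          exact ih (r + 1) _ _ (fun x hx => by
            rcases (PySem.Set.mem_add sr r x).mp hx with hxx | hxx
            · exact lt_trans (hsr x hxx) (by omega)
            · omega)

-- ===== VERDICT (by name: the statement is the Claim_ definition above) =====

theorem rook_in_danger_spec : Claim_equal_rook_in_danger := by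
  intro plan _
  unfold Spec_rook_in_danger rook_in_danger rook_in_danger_alt
  exact (pvScanEqLoop plan 0 PySem.Set.empty PySem.Set.empty (by simp [PySem.Set.empty])).symm
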